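-- pv_equiv track=rewrite | github.com/MrBrantCode/unitest_baseline | mut_generate/mist_train_cf/cf_61933/solution.py | count_thesaurus_frequency
-- ===== SOURCE A (Python) =====
-- from collections import Counter
-- import string
--
-- def count_thesaurus_frequency(thesaurus, text):
--     """
--     Returns the frequency of each phrase in the thesaurus and its corresponding expressions in the text.
--
--     Args:
--     thesaurus (dict): A dictionary with phrases as keys and lists of expressions as values.
--     text (str): The input text.
--
--     Returns:
--     dict: A dictionary with phrases and expressions as keys and their frequencies as values.
--     """
--
--     # Prepare the text: remove punctuation, lower case, and split into words
--     words = text.translate(str.maketrans('', '', string.punctuation)).lower().split()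
--
--     # The counter
--     counter = Counter()
--
--     # Count the phrases and expressions
--     for phrase, expressions in thesaurus.items():
--         # Count the phrase
--         counter[phrase] += words.count(phrase)
--
--         # Count the expressions
--         for expression in expressions:
--             counter[expression] += words.count(expression)
--
--     return dict(counter)
-- ===== SOURCE B (Python) =====
-- from collections import Counter
-- import string
--
-- def count_thesaurus_frequency(thesaurus, text):
--     # Clean the text once and count every word with a single Counter pass.
--     words = text.translate(str.maketrans('', '', string.punctuation)).lower().split()
--     word_freq = Counter(words)
--     # Each term's result is (how many times it appears in the thesaurus stream) * (its word frequency).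
--     terms = [t for phrase, exprs in thesaurus.items() for t in (phrase, *exprs)]
--     multiplicity = Counter(terms)
--     return {t: m * word_freq[t] for t, m in multiplicity.items()}
-- ===== Notes on version B (the rewrite author's own statement) =====
-- stated objective: alternative
-- what changed: A rescans the word list with words.count for every phrase/expression occurrence; B builds one Counter of the cleaned words and one Counter of the thesaurus term stream, then returns term -> multiplicity * word_frequency in the same first-occurrence order.
import Mathlib
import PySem

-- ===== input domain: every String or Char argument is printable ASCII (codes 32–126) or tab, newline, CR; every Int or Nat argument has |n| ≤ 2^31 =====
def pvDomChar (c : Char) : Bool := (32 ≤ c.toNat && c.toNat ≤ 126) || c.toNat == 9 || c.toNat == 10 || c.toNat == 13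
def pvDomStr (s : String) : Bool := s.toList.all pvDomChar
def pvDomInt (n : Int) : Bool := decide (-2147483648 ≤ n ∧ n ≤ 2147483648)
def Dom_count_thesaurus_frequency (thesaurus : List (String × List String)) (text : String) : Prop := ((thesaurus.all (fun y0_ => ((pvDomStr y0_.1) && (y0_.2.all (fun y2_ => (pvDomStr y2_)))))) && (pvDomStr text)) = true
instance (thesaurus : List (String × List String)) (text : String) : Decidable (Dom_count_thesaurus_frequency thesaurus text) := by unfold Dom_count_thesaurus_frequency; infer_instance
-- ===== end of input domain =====

-- B replaces A's per-term words.count scan by one word-frequency Counter and one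
-- thesaurus-multiplicity Counter, multiplying the two per term (objective: alternative).

-- string.punctuation
def pvPunct : List Char := "!\"#$%&'()*+,-./:;<=>?@[\\]^_`{|}~".toList

-- text.translate(str.maketrans('', '', string.punctuation)).lower().split()  (shared first line of A and B)
def pvWords (text : String) : List String :=
  PySem.Str.split₀ (PySem.Str.lower (String.ofList (text.toList.filter (fun c => !(pvPunct.contains c)))))

-- ===== PORT A =====
def count_thesaurus_frequency (thesaurus : List (String × List String)) (text : String) : List (String × Int) :=
  let words := pvWords text
  let counter := thesaurus.foldl (fun d pe =>
      -- counter[phrase] += words.count(phrase)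
      let d := d.modify pe.1 0 (fun v => v + ((words.count pe.1 : Nat) : Int))
      -- for expression in expressions: counter[expression] += words.count(expression)
      pe.2.foldl (fun d e => d.modify e 0 (fun v => v + ((words.count e : Nat) : Int))) d)
    PySem.Dict.empty
  counter.items

-- ===== PORT B =====
def count_thesaurus_frequency_alt (thesaurus : List (String × List String)) (text : String) : List (String × Int) :=
  let wordFreq := PySem.Dict.counter (pvWords text)
  let terms := thesaurus.flatMap (fun pe => pe.1 :: pe.2)
  let multiplicity := PySem.Dict.counter terms
  multiplicity.items.map (fun tm => (tm.1, tm.2 * wordFreq.getD tm.1 0))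

-- ===== PRECONDITION & SPEC =====
def Spec_count_thesaurus_frequency (thesaurus : List (String × List String)) (text : String) (out : List (String × Int)) : Prop := out = count_thesaurus_frequency_alt thesaurus text
instance (thesaurus : List (String × List String)) (text : String) (out : List (String × Int)) : Decidable (Spec_count_thesaurus_frequency thesaurus text out) := by unfold Spec_count_thesaurus_frequency; infer_instance

-- ===== CLAIM (what is proved, stated in full; the proofs are below) =====
def Claim_equal_count_thesaurus_frequency : Prop := ∀ (thesaurus : List (String × List String)) (text : String), Dom_count_thesaurus_frequency thesaurus text → Spec_count_thesaurus_frequency thesaurus text (count_thesaurus_frequency thesaurus text)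

-- ===== LEMMAS AND PROOFS =====

-- Running A's "counter[t] += c t" loop from d leaves each key k at d[k] + (occurrences of k) * c k.
theorem pvGetD_fold (l : List String) (c : String → Int) (d : PySem.Dict String Int) (k : String) :
    (l.foldl (fun d t => d.modify t 0 (fun v => v + c t)) d).getD k 0
      = d.getD k 0 + (l.count k : Int) * c k := by
  induction l generalizing d with
  | nil => simp
  | cons t l ih =>
    simp only [List.foldl_cons, ih, PySem.Dict.getD_modify, List.count_cons]
    by_cases hk : k = t
    · subst hk; simp; ring
    · simp [hk, Ne.symm hk]

-- A dict with distinct keys is its key list paired with its lookups.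
theorem pvItems_of_nodup (d : PySem.Dict String Int) (h : d.keys.Nodup) :
    d.items = d.keys.map (fun k => (k, d.getD k 0)) := by
  have h1 : d.keys.map (fun k => (k, d.getD k 0)) = d.items.map (fun p => (p.1, d.getD p.1 0)) := by
    simp only [PySem.Dict.keys, List.map_map]; rfl
  rw [h1]
  have h2 : d.items.map (fun p => (p.1, d.getD p.1 0)) = d.items.map id := by
    apply List.map_congr_left
    intro p hp
    obtain ⟨k, v⟩ := p
    simp [PySem.Dict.getD_of_mem_items d hp h]
  simp [h2]

-- A's result, characterised: one entry per distinct term in thesaurus-stream order,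
-- valued (multiplicity in the stream) * (frequency in the cleaned words).
theorem pvA_items (thesaurus : List (String × List String)) (text : String) :
    count_thesaurus_frequency thesaurus text
      = (PySem.Set.ofList (thesaurus.flatMap (fun pe => pe.1 :: pe.2))).map
          (fun k => (k, ((thesaurus.flatMap (fun pe => pe.1 :: pe.2)).count k : Int)
                          * (((pvWords text).count k : Nat) : Int))) := by
  have hflat : (thesaurus.foldl (fun d pe =>
      let d := d.modify pe.1 0 (fun v => v + (((pvWords text).count pe.1 : Nat) : Int))
      pe.2.foldl (fun d e => d.modify e 0 (fun v => v + (((pvWords text).count e : Nat) : Int))) d)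
    (PySem.Dict.empty : PySem.Dict String Int))
    = (thesaurus.flatMap (fun pe => pe.1 :: pe.2)).foldl
        (fun d t => d.modify t 0 (fun v => v + (((pvWords text).count t : Nat) : Int))) PySem.Dict.empty := by
    rw [List.foldl_flatMap]
    apply PySem.List.foldl_congr_mem
    intro acc x _
    simp only [List.foldl_cons]
  show (thesaurus.foldl (fun d pe =>
      let d := d.modify pe.1 0 (fun v => v + (((pvWords text).count pe.1 : Nat) : Int))
      pe.2.foldl (fun d e => d.modify e 0 (fun v => v + (((pvWords text).count e : Nat) : Int))) d)
    (PySem.Dict.empty : PySem.Dict String Int)).items = _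
  rw [hflat]
  set terms := thesaurus.flatMap (fun pe => pe.1 :: pe.2) with ht
  set dA := terms.foldl (fun d t => d.modify t 0 (fun v => v + (((pvWords text).count t : Nat) : Int))) PySem.Dict.empty with hdA
  have hkeys : dA.keys = PySem.Set.ofList terms := by
    rw [hdA, PySem.Dict.keys_foldl_modify terms 0 (fun _ t => fun v => v + (((pvWords text).count t : Nat) : Int)),
      PySem.Dict.keys_empty, PySem.Set.ofList_eq_foldl]
    rfl
  have hnodup : dA.keys.Nodup := by rw [hkeys]; exact PySem.Set.nodup_ofList terms
  rw [pvItems_of_nodup dA hnodup, hkeys]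
  apply List.map_congr_left
  intro k _
  rw [hdA, pvGetD_fold terms (fun t => (((pvWords text).count t : Nat) : Int)) PySem.Dict.empty k,
    PySem.Dict.getD_empty, zero_add]

-- B's result, characterised the same way.
theorem pvB_items (thesaurus : List (String × List String)) (text : String) :
    count_thesaurus_frequency_alt thesaurus text
      = (PySem.Set.ofList (thesaurus.flatMap (fun pe => pe.1 :: pe.2))).map
          (fun k => (k, ((thesaurus.flatMap (fun pe => pe.1 :: pe.2)).count k : Int)
                          * (((pvWords text).count k : Nat) : Int))) := by
  show ((PySem.Dict.counter (thesaurus.flatMap (fun pe => pe.1 :: pe.2))).items.map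
      (fun tm => (tm.1, tm.2 * (PySem.Dict.counter (pvWords text)).getD tm.1 0))) = _
  rw [PySem.Dict.items_counter, List.map_map]
  apply List.map_congr_left
  intro k _
  simp only [Function.comp_apply]
  rw [PySem.Dict.getD_counter (pvWords text) k]

-- ===== VERDICT (by name: the statement is the Claim_ definition above) =====
theorem count_thesaurus_frequency_spec : Claim_equal_count_thesaurus_frequency := by
  intro thesaurus text _
  unfold Spec_count_thesaurus_frequency
  rw [pvA_items, pvB_items]
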